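-- pv_equiv track=rewrite | github.com/tkmonson/dsa-library | problems/image_overlap.py | largest_overlap3
-- ===== SOURCE A (Python) =====
-- from collections import defaultdict, deque
--
-- def largest_overlap3(img1: list[list[int]], img2: list[list[int]]) -> int:
--     n = len(img1)
--     points1, points2 = [], []
--     vectors = defaultdict(lambda: 0)
--
--     for r in range(n):
--         for c in range(n):
--             if img1[r][c]:
--                 points1.append((r, c))
--             if img2[r][c]:
--                 points2.append((r, c))
--
--     for p1 in points1:
--         for p2 in points2:
--             vectors[(p2[0] - p1[0], p2[1] - p1[1])] += 1
--
--     max_vector_count = 0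
--     for v in vectors:
--         max_vector_count = max(max_vector_count, vectors[v])
--
--     return max_vector_count
-- ===== SOURCE B (Python) =====
-- def largest_overlap3(img1: list[list[int]], img2: list[list[int]]) -> int:
--     # Enumerate every translation (dr, dc) directly and count the overlap of the
--     # shifted images, instead of counting translation vectors of point pairs.
--     n = len(img1)
--     best = 0
--     for dr in range(1 - n, n):
--         for dc in range(1 - n, n):
--             cnt = 0
--             for r in range(n):
--                 for c in range(n):
--                     if img1[r][c] and 0 <= r + dr < n and 0 <= c + dc < n \
--                             and img2[r + dr][c + dc]:
--                         cnt += 1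
--             best = max(best, cnt)
--     return best
-- ===== Notes on version B (the rewrite author's own statement) =====
-- stated objective: alternative
-- what changed: B enumerates every translation (dr, dc) and counts the overlap of the shifted grids directly, instead of building a defaultdict counter of translation vectors over all pairs of 1-points and taking its maximum.
import Mathlib
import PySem

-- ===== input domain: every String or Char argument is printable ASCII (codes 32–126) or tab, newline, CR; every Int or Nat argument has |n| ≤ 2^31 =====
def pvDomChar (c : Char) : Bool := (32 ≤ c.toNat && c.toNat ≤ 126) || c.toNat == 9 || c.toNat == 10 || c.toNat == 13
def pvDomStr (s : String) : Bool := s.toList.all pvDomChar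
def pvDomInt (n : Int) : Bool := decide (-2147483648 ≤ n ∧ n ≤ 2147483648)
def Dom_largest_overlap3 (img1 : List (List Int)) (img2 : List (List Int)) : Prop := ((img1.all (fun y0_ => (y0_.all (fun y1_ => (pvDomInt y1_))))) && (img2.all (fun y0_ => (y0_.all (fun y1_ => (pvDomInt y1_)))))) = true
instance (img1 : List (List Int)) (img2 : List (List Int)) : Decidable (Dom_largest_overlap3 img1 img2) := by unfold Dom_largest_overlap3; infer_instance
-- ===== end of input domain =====

-- B replaces A's defaultdict of pair translation vectors by a direct enumeration of all
-- translations with an overlap count per shift (alternative algorithm, similar cost).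


-- ===== PORT A =====
def largest_overlap3 (img1 : List (List Int)) (img2 : List (List Int)) : Int :=
  let n : Int := img1.length
  let pts :=
    (PySem.List.pyRange 0 n 1).foldl (fun (acc : List (Int × Int) × List (Int × Int)) r =>
      (PySem.List.pyRange 0 n 1).foldl (fun acc c =>
        ((if PySem.List.pyGetD (PySem.List.pyGetD img1 r []) c 0 ≠ 0
          then acc.1 ++ [(r, c)] else acc.1),
         (if PySem.List.pyGetD (PySem.List.pyGetD img2 r []) c 0 ≠ 0
          then acc.2 ++ [(r, c)] else acc.2))) acc) ([], [])
  let vectors :=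
    pts.1.foldl (fun d p1 =>
      pts.2.foldl (fun (d : PySem.Dict (Int × Int) Int) p2 =>
        d.modify (p2.1 - p1.1, p2.2 - p1.2) 0 (· + 1)) d) PySem.Dict.empty
  vectors.keys.foldl (fun m v => max m (vectors.getD v 0)) 0

-- ===== PORT B =====
def largest_overlap3_alt (img1 : List (List Int)) (img2 : List (List Int)) : Int :=
  let n : Int := img1.length
  (PySem.List.pyRange (1 - n) n 1).foldl (fun best dr =>
    (PySem.List.pyRange (1 - n) n 1).foldl (fun best dc =>
      max best ((PySem.List.pyRange 0 n 1).foldl (fun s r =>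
        (PySem.List.pyRange 0 n 1).foldl (fun s c =>
          if PySem.List.pyGetD (PySem.List.pyGetD img1 r []) c 0 ≠ 0 ∧
             0 ≤ r + dr ∧ r + dr < n ∧ 0 ≤ c + dc ∧ c + dc < n ∧
             PySem.List.pyGetD (PySem.List.pyGetD img2 (r + dr) []) (c + dc) 0 ≠ 0
          then s + 1 else s) s) 0)) best) 0

-- ===== PRECONDITION & SPEC =====
-- Pre_ excludes exactly the inputs where A raises IndexError: a row among the first
-- len(img1) rows of img1 or img2 shorter than len(img1), or img2 with fewer rows than img1.
def Pre_largest_overlap3 (img1 : List (List Int)) (img2 : List (List Int)) : Prop :=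
  (∀ row ∈ img1, img1.length ≤ row.length) ∧ img1.length ≤ img2.length ∧
  (∀ row ∈ img2.take img1.length, img1.length ≤ row.length)
instance (img1 : List (List Int)) (img2 : List (List Int)) : Decidable (Pre_largest_overlap3 img1 img2) := by unfold Pre_largest_overlap3; infer_instance
def pvWitness_largest_overlap3 : List (List Int) × List (List Int) :=
  ([[1, 0], [0, 1]], [[0, 1], [1, 0]])

def Spec_largest_overlap3 (img1 : List (List Int)) (img2 : List (List Int)) (out : Int) : Prop := out = largest_overlap3_alt img1 img2
instance (img1 : List (List Int)) (img2 : List (List Int)) (out : Int) : Decidable (Spec_largest_overlap3 img1 img2 out) := by unfold Spec_largest_overlap3; infer_instance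

-- ===== CLAIM (what is proved, stated in full; the proofs are below) =====
def Claim_equal_largest_overlap3 : Prop := ∀ (img1 : List (List Int)) (img2 : List (List Int)), Dom_largest_overlap3 img1 img2 → Pre_largest_overlap3 img1 img2 → Spec_largest_overlap3 img1 img2 (largest_overlap3 img1 img2)

-- ===== LEMMAS AND PROOFS =====

-- objects the proof talks about
def pvProd (xs ys : List Int) : List (Int × Int) := xs.flatMap (fun a => ys.map (fun b => (a, b)))

abbrev pvCell (img : List (List Int)) (r c : Int) : Int :=
  PySem.List.pyGetD (PySem.List.pyGetD img r []) c 0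

def pvQ (img : List (List Int)) (p : Int × Int) : Bool := pvCell img p.1 p.2 != 0

def pvGrid (n : Int) : List (Int × Int) :=
  pvProd (PySem.List.pyRange 0 n 1) (PySem.List.pyRange 0 n 1)

def pvBox (n : Int) : List (Int × Int) :=
  pvProd (PySem.List.pyRange (1 - n) n 1) (PySem.List.pyRange (1 - n) n 1)

def pvPts (img : List (List Int)) (n : Int) : List (Int × Int) :=
  (pvGrid n).filter (pvQ img)

def pvVecs (img1 img2 : List (List Int)) (n : Int) : List (Int × Int) :=
  (pvPts img1 n).flatMap (fun p1 => (pvPts img2 n).map (fun p2 => (p2.1 - p1.1, p2.2 - p1.2)))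

def pvPb (img1 img2 : List (List Int)) (n : Int) (v p : Int × Int) : Bool :=
  decide (pvCell img1 p.1 p.2 ≠ 0 ∧ 0 ≤ p.1 + v.1 ∧ p.1 + v.1 < n ∧
          0 ≤ p.2 + v.2 ∧ p.2 + v.2 < n ∧ pvCell img2 (p.1 + v.1) (p.2 + v.2) ≠ 0)

def pvCStep (img1 img2 : List (List Int)) (n : Int) (v : Int × Int) : Int → (Int × Int) → Int :=
  fun s p =>
    if pvCell img1 p.1 p.2 ≠ 0 ∧ 0 ≤ p.1 + v.1 ∧ p.1 + v.1 < n ∧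
       0 ≤ p.2 + v.2 ∧ p.2 + v.2 < n ∧ pvCell img2 (p.1 + v.1) (p.2 + v.2) ≠ 0
    then s + 1 else s

def pvCnt (img1 img2 : List (List Int)) (n : Int) (v : Int × Int) : Int :=
  ((pvGrid n).countP (pvPb img1 img2 n v) : Nat)

lemma pvProd_eq (xs ys : List Int) : pvProd xs ys = xs ×ˢ ys := rfl

lemma mem_pvProd (xs ys : List Int) (p : Int × Int) :
    p ∈ pvProd xs ys ↔ p.1 ∈ xs ∧ p.2 ∈ ys := by
  obtain ⟨a, b⟩ := p; rw [pvProd_eq]; exact List.mem_product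

lemma mem_pvGrid (n : Int) (p : Int × Int) :
    p ∈ pvGrid n ↔ 0 ≤ p.1 ∧ p.1 < n ∧ 0 ≤ p.2 ∧ p.2 < n := by
  rw [pvGrid, mem_pvProd]
  simp only [PySem.List.mem_pyRange_one]
  tauto

lemma mem_pvBox (n : Int) (p : Int × Int) :
    p ∈ pvBox n ↔ (1 - n ≤ p.1 ∧ p.1 < n) ∧ (1 - n ≤ p.2 ∧ p.2 < n) := by
  rw [pvBox, mem_pvProd]
  simp only [PySem.List.mem_pyRange_one]

lemma nodup_pvGrid (n : Int) : (pvGrid n).Nodup := by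
  rw [pvGrid, pvProd_eq]
  exact (PySem.List.nodup_pyRange_one 0 n).product (PySem.List.nodup_pyRange_one 0 n)

lemma nodup_pvPts (img : List (List Int)) (n : Int) : (pvPts img n).Nodup :=
  (nodup_pvGrid n).filter (pvQ img)

lemma mem_pvPts (img : List (List Int)) (n : Int) (p : Int × Int) :
    p ∈ pvPts img n ↔ (0 ≤ p.1 ∧ p.1 < n ∧ 0 ≤ p.2 ∧ p.2 < n) ∧ pvCell img p.1 p.2 ≠ 0 := by
  rw [pvPts, List.mem_filter, mem_pvGrid, pvQ, bne_iff_ne]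

-- A's two-list accumulation loop is an append of two filters
lemma pv_pts_fold (img1 img2 : List (List Int)) (l : List (Int × Int))
    (ab : List (Int × Int) × List (Int × Int)) :
    l.foldl (fun (acc : List (Int × Int) × List (Int × Int)) (p : Int × Int) =>
        ((if pvCell img1 p.1 p.2 ≠ 0 then acc.1 ++ [p] else acc.1),
         (if pvCell img2 p.1 p.2 ≠ 0 then acc.2 ++ [p] else acc.2))) ab
      = (ab.1 ++ l.filter (pvQ img1), ab.2 ++ l.filter (pvQ img2)) := by
  induction l generalizing ab with
  | nil => simp
  | cons x xs ih =>
    simp only [List.foldl_cons, List.filter_cons, ih]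
    by_cases h1 : pvCell img1 x.1 x.2 ≠ 0 <;> by_cases h2 : pvCell img2 x.1 x.2 ≠ 0 <;>
      simp [pvQ, h1, h2, bne_iff_ne]

-- B's inner double loop counts pvPb
lemma pv_cstep_count (img1 img2 : List (List Int)) (n : Int) (v : Int × Int)
    (l : List (Int × Int)) (s : Int) :
    l.foldl (pvCStep img1 img2 n v) s = s + ((l.countP (pvPb img1 img2 n v) : Nat) : Int) := by
  induction l generalizing s with
  | nil => simp
  | cons x xs ih =>
    simp only [List.foldl_cons, List.countP_cons, ih]
    by_cases h : pvCell img1 x.1 x.2 ≠ 0 ∧ 0 ≤ x.1 + v.1 ∧ x.1 + v.1 < n ∧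
        0 ≤ x.2 + v.2 ∧ x.2 + v.2 < n ∧ pvCell img2 (x.1 + v.1) (x.2 + v.2) ≠ 0 <;>
      (simp [pvCStep, pvPb, h]; try omega)

lemma pv_sum_map_indicator {P : Int × Int → Prop} [DecidablePred P] (l : List (Int × Int)) :
    (l.map (fun x => if P x then 1 else 0)).sum = l.countP (fun x => decide (P x)) := by
  induction l with
  | nil => simp
  | cons x xs ih =>
    simp only [List.map_cons, List.sum_cons, List.countP_cons, ih]
    by_cases h : P x <;> simp [h, Nat.add_comm]

lemma pv_foldl_max_le (t : List Int) : ∀ (a X : Int), a ≤ X → (∀ y ∈ t, y ≤ X) →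
    t.foldl max a ≤ X := by
  induction t with
  | nil => intro a X ha _; simpa using ha
  | cons x xs ih =>
    intro a X ha h
    exact ih _ X (max_le ha (h x (by simp))) (fun y hy => h y (by simp [hy]))

lemma pv_max_folds_eq (f : Int × Int → Int) (S T : List (Int × Int))
    (hST : ∀ v ∈ S, v ∈ T) (hT : ∀ v ∈ T, f v ≤ 0 ∨ v ∈ S) :
    S.foldl (fun m v => max m (f v)) 0 = T.foldl (fun m v => max m (f v)) 0 := by
  have hS : S.foldl (fun m v => max m (f v)) 0 = (S.map f).foldl max 0 := List.foldl_map.symm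
  have hTT : T.foldl (fun m v => max m (f v)) 0 = (T.map f).foldl max 0 := List.foldl_map.symm
  rw [hS, hTT]
  apply le_antisymm
  · apply pv_foldl_max_le _ _ _ ((PySem.List.le_foldl_max (T.map f) 0).1)
    intro y hy
    obtain ⟨v, hv, rfl⟩ := List.mem_map.1 hy
    exact (PySem.List.le_foldl_max (T.map f) 0).2 _ (List.mem_map_of_mem (hST v hv))
  · apply pv_foldl_max_le _ _ _ ((PySem.List.le_foldl_max (S.map f) 0).1)
    intro y hy
    obtain ⟨v, hv, rfl⟩ := List.mem_map.1 hy
    rcases hT v hv with h0 | hmem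
    · exact le_trans h0 ((PySem.List.le_foldl_max (S.map f) 0).1)
    · exact (PySem.List.le_foldl_max (S.map f) 0).2 _ (List.mem_map_of_mem hmem)

-- A computes the maximal multiplicity in the multiset of translation vectors
lemma overlapA_eq (img1 img2 : List (List Int)) :
    largest_overlap3 img1 img2 =
      (PySem.Set.ofList (pvVecs img1 img2 (img1.length : Int))).foldl
        (fun m v => max m ((List.count v (pvVecs img1 img2 (img1.length : Int)) : Nat) : Int)) 0 := by
  simp only [largest_overlap3]
  have hinner : ∀ (acc : List (Int × Int) × List (Int × Int)) (r : Int),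
      (PySem.List.pyRange 0 (img1.length : Int) 1).foldl (fun acc c =>
        ((if PySem.List.pyGetD (PySem.List.pyGetD img1 r []) c 0 ≠ 0
          then acc.1 ++ [(r, c)] else acc.1),
         (if PySem.List.pyGetD (PySem.List.pyGetD img2 r []) c 0 ≠ 0
          then acc.2 ++ [(r, c)] else acc.2))) acc
      = ((PySem.List.pyRange 0 (img1.length : Int) 1).map (fun c => (r, c))).foldl
          (fun (acc : List (Int × Int) × List (Int × Int)) (p : Int × Int) =>
            ((if pvCell img1 p.1 p.2 ≠ 0 then acc.1 ++ [p] else acc.1),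
             (if pvCell img2 p.1 p.2 ≠ 0 then acc.2 ++ [p] else acc.2))) acc := by
    intro acc r
    rw [List.foldl_map]
  simp only [hinner]
  have hflat : (PySem.List.pyRange 0 (img1.length : Int) 1).foldl
      (fun (acc : List (Int × Int) × List (Int × Int)) (r : Int) =>
        ((PySem.List.pyRange 0 (img1.length : Int) 1).map (fun c => (r, c))).foldl
          (fun (acc : List (Int × Int) × List (Int × Int)) (p : Int × Int) =>
            ((if pvCell img1 p.1 p.2 ≠ 0 then acc.1 ++ [p] else acc.1),
             (if pvCell img2 p.1 p.2 ≠ 0 then acc.2 ++ [p] else acc.2))) acc) ([], [])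
      = (pvGrid (img1.length : Int)).foldl
          (fun (acc : List (Int × Int) × List (Int × Int)) (p : Int × Int) =>
            ((if pvCell img1 p.1 p.2 ≠ 0 then acc.1 ++ [p] else acc.1),
             (if pvCell img2 p.1 p.2 ≠ 0 then acc.2 ++ [p] else acc.2))) ([], []) :=
    (List.foldl_flatMap).symm
  rw [hflat, pv_pts_fold]
  simp only [List.nil_append]
  have hinner2 : ∀ (d : PySem.Dict (Int × Int) Int) (p1 : Int × Int),
      (List.filter (pvQ img2) (pvGrid (img1.length : Int))).foldl
        (fun (d : PySem.Dict (Int × Int) Int) p2 =>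
          d.modify (p2.1 - p1.1, p2.2 - p1.2) 0 (· + 1)) d
      = ((List.filter (pvQ img2) (pvGrid (img1.length : Int))).map
          (fun p2 => (p2.1 - p1.1, p2.2 - p1.2))).foldl
          (fun (d : PySem.Dict (Int × Int) Int) k => d.modify k 0 (· + 1)) d := by
    intro d p1
    rw [List.foldl_map]
  simp only [hinner2]
  have hflat2 : (List.filter (pvQ img1) (pvGrid (img1.length : Int))).foldl
      (fun (d : PySem.Dict (Int × Int) Int) (p1 : Int × Int) =>
        ((List.filter (pvQ img2) (pvGrid (img1.length : Int))).map
          (fun p2 => (p2.1 - p1.1, p2.2 - p1.2))).foldl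
          (fun (d : PySem.Dict (Int × Int) Int) k => d.modify k 0 (· + 1)) d)
      PySem.Dict.empty
      = (pvVecs img1 img2 (img1.length : Int)).foldl
          (fun (d : PySem.Dict (Int × Int) Int) k => d.modify k 0 (· + 1)) PySem.Dict.empty :=
    (List.foldl_flatMap).symm
  rw [hflat2]
  have hctr : (pvVecs img1 img2 (img1.length : Int)).foldl
      (fun (d : PySem.Dict (Int × Int) Int) k => d.modify k 0 (· + 1)) PySem.Dict.empty
      = PySem.Dict.counter (pvVecs img1 img2 (img1.length : Int)) := rfl
  rw [hctr]
  simp only [PySem.Dict.keys_counter, PySem.Dict.getD_counter]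

-- B computes the maximal per-translation overlap count over the box of translations
lemma overlapB_eq (img1 img2 : List (List Int)) :
    largest_overlap3_alt img1 img2 =
      (pvBox (img1.length : Int)).foldl
        (fun m v => max m (pvCnt img1 img2 (img1.length : Int) v)) 0 := by
  simp only [largest_overlap3_alt]
  have h1 : ∀ (dr dc s r : Int),
      (PySem.List.pyRange 0 (img1.length : Int) 1).foldl (fun s c =>
        if PySem.List.pyGetD (PySem.List.pyGetD img1 r []) c 0 ≠ 0 ∧
           0 ≤ r + dr ∧ r + dr < (img1.length : Int) ∧ 0 ≤ c + dc ∧ c + dc < (img1.length : Int) ∧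
           PySem.List.pyGetD (PySem.List.pyGetD img2 (r + dr) []) (c + dc) 0 ≠ 0
        then s + 1 else s) s
      = ((PySem.List.pyRange 0 (img1.length : Int) 1).map (fun c => (r, c))).foldl
          (pvCStep img1 img2 (img1.length : Int) (dr, dc)) s := by
    intro dr dc s r
    rw [List.foldl_map]
    rfl
  simp only [h1]
  have h2 : ∀ (v : Int × Int) (s : Int),
      (PySem.List.pyRange 0 (img1.length : Int) 1).foldl (fun s r =>
        ((PySem.List.pyRange 0 (img1.length : Int) 1).map (fun c => (r, c))).foldl
          (pvCStep img1 img2 (img1.length : Int) v) s) s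
      = (pvGrid (img1.length : Int)).foldl (pvCStep img1 img2 (img1.length : Int) v) s :=
    fun v s => (List.foldl_flatMap).symm
  simp only [h2]
  have h3 : ∀ (v : Int × Int),
      (pvGrid (img1.length : Int)).foldl (pvCStep img1 img2 (img1.length : Int) v) 0
      = pvCnt img1 img2 (img1.length : Int) v := by
    intro v
    rw [pv_cstep_count]
    simp [pvCnt]
  simp only [h3]
  have h4 : ∀ (best dr : Int),
      (PySem.List.pyRange (1 - (img1.length : Int)) (img1.length : Int) 1).foldl
        (fun best dc => max best (pvCnt img1 img2 (img1.length : Int) (dr, dc))) best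
      = ((PySem.List.pyRange (1 - (img1.length : Int)) (img1.length : Int) 1).map
          (fun dc => (dr, dc))).foldl
          (fun m v => max m (pvCnt img1 img2 (img1.length : Int) v)) best := by
    intro best dr
    rw [List.foldl_map]
  simp only [h4]
  exact (List.foldl_flatMap).symm

-- the per-translation overlap count equals the multiplicity of that translation vector
lemma pv_count_key (img1 img2 : List (List Int)) (n : Int) (v : Int × Int) :
    (pvGrid n).countP (pvPb img1 img2 n v) = List.count v (pvVecs img1 img2 n) := by
  have hcnt2 : ∀ p1 : Int × Int,
      List.countP (fun x => x == v)
          ((pvPts img2 n).map (fun p2 => (p2.1 - p1.1, p2.2 - p1.2)))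
        = if (p1.1 + v.1, p1.2 + v.2) ∈ pvPts img2 n then 1 else 0 := by
    intro p1
    rw [List.countP_map]
    have hcg : List.countP ((fun x => x == v) ∘ (fun p2 => (p2.1 - p1.1, p2.2 - p1.2)))
        (pvPts img2 n)
        = List.countP (fun p2 => p2 == (p1.1 + v.1, p1.2 + v.2)) (pvPts img2 n) := by
      apply List.countP_congr
      intro p2 _
      simp only [Function.comp_apply, beq_iff_eq, Prod.ext_iff]
      omega
    rw [hcg]
    by_cases hmem : (p1.1 + v.1, p1.2 + v.2) ∈ pvPts img2 n
    · rw [if_pos hmem]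
      exact List.count_eq_one_of_mem (nodup_pvPts img2 n) hmem
    · rw [if_neg hmem]
      exact List.count_eq_zero.2 hmem
  rw [show List.count v (pvVecs img1 img2 n)
      = List.countP (fun x => x == v) (pvVecs img1 img2 n) from rfl]
  rw [pvVecs, List.countP_flatMap]
  have hmc : List.map ((List.countP fun x => x == v) ∘
        fun p1 => List.map (fun p2 => (p2.1 - p1.1, p2.2 - p1.2)) (pvPts img2 n)) (pvPts img1 n)
      = List.map (fun p1 => if (p1.1 + v.1, p1.2 + v.2) ∈ pvPts img2 n then 1 else 0)
          (pvPts img1 n) :=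
    List.map_congr_left (fun p1 _ => hcnt2 p1)
  rw [hmc]
  rw [pv_sum_map_indicator (P := fun p1 => (p1.1 + v.1, p1.2 + v.2) ∈ pvPts img2 n)]
  rw [show pvPts img1 n = (pvGrid n).filter (pvQ img1) from rfl, List.countP_filter]
  apply List.countP_congr
  intro p _
  simp only [pvPb, pvQ, Bool.and_eq_true, decide_eq_true_eq, bne_iff_ne, mem_pvPts]
  constructor <;> intro h <;> tauto

lemma pv_cnt_eq_count (img1 img2 : List (List Int)) (v : Int × Int) :
    pvCnt img1 img2 (img1.length : Int) v =
      ((List.count v (pvVecs img1 img2 (img1.length : Int)) : Nat) : Int) := by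
  simp [pvCnt, pv_count_key]

lemma pv_vec_in_box (img1 img2 : List (List Int)) (v : Int × Int)
    (hv : v ∈ pvVecs img1 img2 (img1.length : Int)) : v ∈ pvBox (img1.length : Int) := by
  simp only [pvVecs, List.mem_flatMap, List.mem_map] at hv
  obtain ⟨p1, h1, p2, h2, rfl⟩ := hv
  have b1 := ((mem_pvPts img1 _ p1).1 h1).1
  have b2 := ((mem_pvPts img2 _ p2).1 h2).1
  rw [mem_pvBox]
  constructor <;> constructor <;> omega

-- ===== VERDICT (by name: the statement is the Claim_ definition above) =====
theorem largest_overlap3_spec : Claim_equal_largest_overlap3 := by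
  intro img1 img2 _hD _hP
  unfold Spec_largest_overlap3
  rw [overlapA_eq, overlapB_eq]
  have hf : ∀ v : Int × Int, pvCnt img1 img2 (img1.length : Int) v
      = ((List.count v (pvVecs img1 img2 (img1.length : Int)) : Nat) : Int) :=
    pv_cnt_eq_count img1 img2
  simp only [hf]
  apply pv_max_folds_eq
  · intro v hv
    exact pv_vec_in_box img1 img2 v ((PySem.Set.mem_ofList _ _).1 hv)
  · intro v _
    by_cases hmem : v ∈ pvVecs img1 img2 (img1.length : Int)
    · exact Or.inr ((PySem.Set.mem_ofList _ _).2 hmem)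
    · left
      simp [List.count_eq_zero.2 hmem]
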